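-- pv_equiv track=rewrite | github.com/alimohammad0816/challenges | get_repeated_info.py | get_repeated_info
-- ===== SOURCE A (Python) =====
-- def get_repeated_info(numbers: int) -> dict:
--     numbers = [i for i in str(numbers)]
--     result = {}
--
--     for i in numbers:
--         if int(i) not in result:
--             result[int(i)] = i * int(i)
--         else:
--             result[int(i)] += i * int(i)
--
--     return result
-- ===== SOURCE B (Python) =====
-- def get_repeated_info(numbers: int) -> dict:
--     counts = {}
--     for ch in str(numbers):
--         counts[ch] = counts.get(ch, 0) + 1
--     return {int(ch): ch * (int(ch) * k) for ch, k in counts.items()}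
-- ===== Notes on version B (the rewrite author's own statement) =====
-- stated objective: alternative
-- what changed: B first builds a frequency table of the digit characters and then emits each distinct digit's value once as ch*(digit*count), replacing A's per-character incremental dict accumulation with repeated string concatenation.
import Mathlib
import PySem

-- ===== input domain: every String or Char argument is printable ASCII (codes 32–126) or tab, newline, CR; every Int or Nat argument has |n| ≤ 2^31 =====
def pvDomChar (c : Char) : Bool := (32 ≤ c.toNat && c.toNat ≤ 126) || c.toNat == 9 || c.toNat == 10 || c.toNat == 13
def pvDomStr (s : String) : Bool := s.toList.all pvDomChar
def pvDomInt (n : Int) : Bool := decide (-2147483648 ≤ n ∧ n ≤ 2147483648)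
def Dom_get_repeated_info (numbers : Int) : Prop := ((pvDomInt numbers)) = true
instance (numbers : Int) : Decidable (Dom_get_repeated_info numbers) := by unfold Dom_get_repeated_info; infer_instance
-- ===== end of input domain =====

-- B counts the digit characters first and then emits each distinct digit's value once
-- as ch*(digit*count), instead of A's per-character incremental dict accumulation (objective: alternative).
-- Both ports represent dict values as List Char during the loop and wrap with String.mk at the end
-- (exact: only concatenation/repetition of characters is performed).

-- ===== PORT A =====
-- int(i) for a single character i: on the digit characters admitted by Pre_ this equals
-- Python's int(i); inputs containing a non-digit character ('-') are excluded by Pre_.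
def pyDigitInt (c : Char) : Int := (c.toNat : Int) - 48

def get_repeated_info (numbers : Int) : List (Int × String) :=
  -- numbers = [i for i in str(numbers)]
  let chars : List Char := PySem.Int.toChars numbers
  -- result = {}; for i in numbers: if int(i) not in result: result[int(i)] = i*int(i) else: result[int(i)] += i*int(i)
  let result : PySem.Dict Int (List Char) :=
    chars.foldl (fun result i =>
      if result.contains (pyDigitInt i) = false then
        result.insert (pyDigitInt i) (PySem.List.pyRepeat [i] (pyDigitInt i))
      else
        result.insert (pyDigitInt i)
          (result.getD (pyDigitInt i) [] ++ PySem.List.pyRepeat [i] (pyDigitInt i)))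
      PySem.Dict.empty
  result.items.map (fun p => (p.1, String.mk p.2))

-- ===== PORT B =====
def get_repeated_info_alt (numbers : Int) : List (Int × String) :=
  -- counts = {}; for ch in str(numbers): counts[ch] = counts.get(ch, 0) + 1
  let counts : PySem.Dict Char Int :=
    (PySem.Int.toChars numbers).foldl (fun d ch => d.insert ch (d.getD ch 0 + 1)) PySem.Dict.empty
  -- {int(ch): ch * (int(ch) * k) for ch, k in counts.items()}
  counts.items.map (fun p =>
    (pyDigitInt p.1, String.mk (PySem.List.pyRepeat [p.1] (pyDigitInt p.1 * p.2))))

-- ===== PRECONDITION & SPEC =====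
-- Pre_ excludes exactly the inputs where Python A raises ValueError: str(numbers) of a
-- negative number contains '-', on which int(i) raises (B raises there too).
def Pre_get_repeated_info (numbers : Int) : Prop := 0 ≤ numbers
instance (numbers : Int) : Decidable (Pre_get_repeated_info numbers) := by
  unfold Pre_get_repeated_info; infer_instance
def pvWitness_get_repeated_info : Int := 1223

def Spec_get_repeated_info (numbers : Int) (out : List (Int × String)) : Prop := out = get_repeated_info_alt numbers
instance (numbers : Int) (out : List (Int × String)) : Decidable (Spec_get_repeated_info numbers out) := by unfold Spec_get_repeated_info; infer_instance

-- ===== CLAIM (what is proved, stated in full; the proofs are below) =====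
def Claim_equal_get_repeated_info : Prop := ∀ (numbers : Int), Dom_get_repeated_info numbers → Pre_get_repeated_info numbers → Spec_get_repeated_info numbers (get_repeated_info numbers)

-- ===== LEMMAS AND PROOFS =====

theorem pyDigitInt_inj {x c : Char} (h : pyDigitInt x = pyDigitInt c) : x = c := by
  unfold pyDigitInt at h
  have hn : x.toNat = c.toNat := by omega
  rw [← Char.ofNat_toNat x, ← Char.ofNat_toNat c, hn]

-- A's loop step with the branch pushed inside the insert (both branches insert at the same key).
def stepA (d : PySem.Dict Int (List Char)) (i : Char) : PySem.Dict Int (List Char) :=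
  d.insert (pyDigitInt i)
    (if d.contains (pyDigitInt i) = false then PySem.List.pyRepeat [i] (pyDigitInt i)
     else d.getD (pyDigitInt i) [] ++ PySem.List.pyRepeat [i] (pyDigitInt i))

theorem foldA_eq_stepA (l : List Char) :
    l.foldl (fun result i =>
      if result.contains (pyDigitInt i) = false then
        result.insert (pyDigitInt i) (PySem.List.pyRepeat [i] (pyDigitInt i))
      else
        result.insert (pyDigitInt i)
          (result.getD (pyDigitInt i) [] ++ PySem.List.pyRepeat [i] (pyDigitInt i)))
      PySem.Dict.empty
    = l.foldl stepA PySem.Dict.empty := by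
  apply PySem.List.foldl_congr_mem
  intro acc x _
  by_cases h : acc.contains (pyDigitInt x) = false <;> simp [stepA, h]

theorem replicate_split (k : Int) (cnt : Nat) (c : Char) :
    List.replicate (k * cnt).toNat c ++ List.replicate k.toNat c
      = List.replicate (k * (cnt + 1)).toNat c := by
  rw [← List.replicate_add]
  congr 1
  by_cases hk : 0 ≤ k
  · have h1 : (0:Int) ≤ k * cnt := by positivity
    have : k * (↑cnt + 1) = k * cnt + k := by ring
    omega
  · have hk' : k ≤ 0 := le_of_not_ge hk
    have h1 : k * cnt ≤ 0 := mul_nonpos_of_nonpos_of_nonneg hk' (by positivity)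
    have h2 : k * (↑cnt + 1) ≤ 0 := mul_nonpos_of_nonpos_of_nonneg hk' (by positivity)
    omega

theorem keys_foldA (l : List Char) :
    (l.foldl stepA PySem.Dict.empty).keys = PySem.Set.ofList (l.map pyDigitInt) := by
  have := PySem.Dict.keys_foldl_insert_key (l := l) (key := pyDigitInt)
    (f := fun d i =>
      if d.contains (pyDigitInt i) = false then PySem.List.pyRepeat [i] (pyDigitInt i)
      else d.getD (pyDigitInt i) [] ++ PySem.List.pyRepeat [i] (pyDigitInt i))
    (d := PySem.Dict.empty)
  rw [PySem.Set.ofList_eq_foldl]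
  exact this

theorem nodup_keys_foldA (l : List Char) :
    (l.foldl stepA PySem.Dict.empty).keys.Nodup := by
  have := PySem.Dict.nodup_keys_foldl_insert_key (l := l) (key := pyDigitInt)
    (f := fun d i =>
      if d.contains (pyDigitInt i) = false then PySem.List.pyRepeat [i] (pyDigitInt i)
      else d.getD (pyDigitInt i) [] ++ PySem.List.pyRepeat [i] (pyDigitInt i))
    (d := PySem.Dict.empty) (by simp [PySem.Dict.keys_empty])
  exact this

theorem contains_foldA (l : List Char) (c : Char) :
    (l.foldl stepA PySem.Dict.empty).contains (pyDigitInt c) = decide (c ∈ l) := by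
  rw [PySem.Dict.contains_eq_decide_mem_keys, keys_foldA]
  simp only [decide_eq_decide, PySem.Set.mem_ofList, List.mem_map]
  constructor
  · rintro ⟨x, hx, hex⟩; exact (pyDigitInt_inj hex) ▸ hx
  · intro h; exact ⟨c, h, rfl⟩

-- the value function both sides compute for a distinct digit character
def valA (l : List Char) (c : Char) : Int × List Char :=
  (pyDigitInt c, List.replicate (pyDigitInt c * l.count c).toNat c)

theorem items_foldA (l : List Char) :
    (l.foldl stepA PySem.Dict.empty).items = (PySem.Set.ofList l).map (valA l) := by
  induction l using List.reverseRecOn with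
  | nil => rfl
  | append_singleton l c ih =>
    rw [List.foldl_append, List.foldl_cons, List.foldl_nil]
    by_cases hc : c ∈ l
    · -- existing key: in-place replacement
      have hcont : (l.foldl stepA PySem.Dict.empty).contains (pyDigitInt c) = true := by
        rw [contains_foldA]; simpa using hc
      have hset : PySem.Set.ofList (l ++ [c]) = PySem.Set.ofList l := by
        simp [PySem.Set.ofList_append_singleton, PySem.Set.add, PySem.Set.contains, hc]
      have hgetD : (l.foldl stepA PySem.Dict.empty).getD (pyDigitInt c) []
          = List.replicate (pyDigitInt c * l.count c).toNat c := by
        apply PySem.Dict.getD_of_mem_items _ ?_ (nodup_keys_foldA l)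
        rw [ih]
        exact List.mem_map.2 ⟨c, by simpa [PySem.Set.mem_ofList] using hc, rfl⟩
      rw [stepA, hcont]
      simp only [Bool.true_eq_false, if_false]
      rw [PySem.Dict.items_insert_of_contains _ _ hcont, ih, hset, List.map_map]
      apply List.map_congr_left
      intro x hx
      have hxl : x ∈ l := by simpa [PySem.Set.mem_ofList] using hx
      by_cases hxc : x = c
      · subst hxc
        simp only [Function.comp_def, valA, beq_self_eq_true, if_pos, Prod.mk.injEq]
        refine ⟨trivial, ?_⟩
        have hcl : (l ++ [x]).count x = l.count x + 1 := by simp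
        rw [hgetD, PySem.List.pyRepeat_singleton, hcl]
        push_cast
        exact replicate_split (pyDigitInt x) (l.count x) x
      · have hne : (pyDigitInt x == pyDigitInt c) = false := by
          simp only [beq_eq_false_iff_ne, ne_eq]
          intro h; exact hxc (pyDigitInt_inj h)
        simp only [Function.comp_def, valA, hne, Bool.false_eq_true, if_false]
        have : (l ++ [c]).count x = l.count x := by
          rw [List.count_append, List.count_singleton,
            if_neg (fun h => hxc (beq_iff_eq.mp h).symm)]
          omega
        rw [this]
    · -- fresh key: append
      have hcont : (l.foldl stepA PySem.Dict.empty).contains (pyDigitInt c) = false := by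
        rw [contains_foldA]; simpa using hc
      have hset : PySem.Set.ofList (l ++ [c]) = PySem.Set.ofList l ++ [c] := by
        simp [PySem.Set.ofList_append_singleton, PySem.Set.add, PySem.Set.contains, hc]
      rw [stepA, hcont]
      simp only [if_pos]
      rw [PySem.Dict.items_insert_of_not_contains _ _ hcont, ih, hset, List.map_append]
      congr 1
      · apply List.map_congr_left
        intro x hx
        have hxl : x ∈ l := by simpa [PySem.Set.mem_ofList] using hx
        have hxc : x ≠ c := fun h => hc (h ▸ hxl)
        have : (l ++ [c]).count x = l.count x := by
          rw [List.count_append, List.count_singleton,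
            if_neg (fun h => hxc (beq_iff_eq.mp h).symm)]
          omega
        simp [valA, this]
      · simp [valA, List.count_append, List.count_eq_zero_of_not_mem hc,
          PySem.List.pyRepeat_singleton]

theorem items_countsB (l : List Char) :
    (l.foldl (fun d ch => d.insert ch (d.getD ch 0 + 1)) PySem.Dict.empty).items
      = (PySem.Set.ofList l).map (fun c => (c, (l.count c : Int))) := by
  rw [PySem.Dict.foldl_insert_getD_add_one_eq_counter, PySem.Dict.items_counter]

-- ===== VERDICT (by name: the statement is the Claim_ definition above) =====
theorem get_repeated_info_spec : Claim_equal_get_repeated_info := by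
  intro numbers _ _
  unfold Spec_get_repeated_info get_repeated_info get_repeated_info_alt
  simp only [foldA_eq_stepA, items_foldA, items_countsB, List.map_map]
  apply List.map_congr_left
  intro c _
  simp [Function.comp, valA, PySem.List.pyRepeat_singleton]
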